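-- pv_equiv track=rewrite | github.com/AndreaVinars/Mesh---FEM---NN | Pipeline/simulation.py | format_nset
-- ===== SOURCE A (Python) =====
-- from typing import Any, Dict, List, Tuple
--
-- def format_nset(name: str, nodes: List[int], per_line: int = 16) -> str:
--
--     """
--     Create a CalculiX *NSET block for a given list of nodes.
--     """
--
--     lines = [f"*NSET, NSET={name}"]
--     current: List[str] = []
--
--     for n in nodes:
--         current.append(str(n))
--         if len(current) >= per_line:
--             lines.append(", ".join(current))
--             current = []
--
--     if current:
--         lines.append(", ".join(current))
--
--     return "\n".join(lines) + "\n"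
-- ===== SOURCE B (Python) =====
-- def format_nset(name, nodes, per_line=16):
--     """
--     Create a CalculiX *NSET block for a given list of nodes.
--     Chunked version: slice the node list into fixed-size chunks
--     (step clamped to 1 so per_line <= 0 gives one node per line,
--     as the original does).
--     """
--     step = max(per_line, 1)
--     lines = [f"*NSET, NSET={name}"]
--     rest = nodes
--     while rest:
--         lines.append(", ".join(str(x) for x in rest[:step]))
--         rest = rest[step:]
--     return "\n".join(lines) + "\n"
-- ===== Notes on version B (the rewrite author's own statement) =====
-- stated objective: alternative
-- what changed: Replaces A's element-by-element accumulate-and-flush line buffer with a loop that slices the node list into fixed-size chunks (step = max(per_line, 1)) and joins each slice directly.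
import Mathlib
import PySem

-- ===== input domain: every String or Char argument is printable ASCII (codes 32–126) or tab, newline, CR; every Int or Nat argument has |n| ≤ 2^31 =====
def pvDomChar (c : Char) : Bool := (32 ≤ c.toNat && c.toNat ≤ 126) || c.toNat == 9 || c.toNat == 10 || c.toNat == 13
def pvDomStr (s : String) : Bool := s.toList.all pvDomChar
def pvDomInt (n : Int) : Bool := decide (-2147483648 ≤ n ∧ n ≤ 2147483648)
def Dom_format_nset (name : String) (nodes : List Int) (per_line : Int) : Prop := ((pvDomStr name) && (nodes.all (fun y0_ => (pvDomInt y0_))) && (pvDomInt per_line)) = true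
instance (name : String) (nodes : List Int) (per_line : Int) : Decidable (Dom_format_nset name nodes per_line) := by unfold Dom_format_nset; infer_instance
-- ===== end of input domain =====

-- B replaces A's element-by-element accumulate-and-flush buffer by slicing the node
-- list into fixed-size chunks (alternative decomposition, same cost).


-- ===== PORT A =====
-- literal transliteration of A: fold over nodes with state (lines, current),
-- flushing current when len(current) >= per_line, then the post-loop flush.
def format_nset (name : String) (nodes : List Int) (per_line : Int) : String :=
  let st := nodes.foldl (fun (st : List String × List String) n =>
      let cur := st.2 ++ [PySem.Int.toStr n]
      if per_line ≤ (cur.length : Int) then (st.1 ++ [PySem.Str.join ", " cur], [])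
      else (st.1, cur))
    (["*NSET, NSET=" ++ name], [])
  let lines := if st.2 ≠ [] then st.1 ++ [PySem.Str.join ", " st.2] else st.1
  PySem.Str.join "\n" lines ++ "\n"

-- ===== PORT B =====
-- the while loop of Source B: emit ", ".join of rest[:step], continue on rest[step:].
-- In the cons case rest[step:] is written rest.drop (step-1) (equal for step ≥ 1,
-- the only values the caller passes) so the recursion is visibly decreasing.
def pvChunks (step : Nat) : List Int → List String
  | [] => []
  | n :: rest =>
      PySem.Str.join ", " (((n :: rest).take step).map PySem.Int.toStr)
        :: pvChunks step (rest.drop (step - 1))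
  termination_by ns => ns.length
  decreasing_by simp [List.length_drop]

def format_nset_alt (name : String) (nodes : List Int) (per_line : Int) : String :=
  let step := max per_line 1
  PySem.Str.join "\n" (("*NSET, NSET=" ++ name) :: pvChunks step.toNat nodes) ++ "\n"

-- ===== PRECONDITION & SPEC =====
def Spec_format_nset (name : String) (nodes : List Int) (per_line : Int) (out : String) : Prop := out = format_nset_alt name nodes per_line
instance (name : String) (nodes : List Int) (per_line : Int) (out : String) : Decidable (Spec_format_nset name nodes per_line out) := by unfold Spec_format_nset; infer_instance

-- ===== CLAIM (what is proved, stated in full; the proofs are below) =====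
def Claim_equal_format_nset : Prop := ∀ (name : String) (nodes : List Int) (per_line : Int), Dom_format_nset name nodes per_line → Spec_format_nset name nodes per_line (format_nset name nodes per_line)

-- ===== LEMMAS AND PROOFS =====

-- A's loop body with the flush condition stated over Nat lengths (step = (max per_line 1).toNat)
def pvStepN (step : Nat) (st : List String × List String) (n : Int) : List String × List String :=
  let cur := st.2 ++ [PySem.Int.toStr n]
  if step ≤ cur.length then (st.1 ++ [PySem.Str.join ", " cur], [])
  else (st.1, cur)

-- A's whole loop (including the post-loop flush), written as structural recursion
def pvAux (step : Nat) (cur : List String) : List Int → List String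
  | [] => if cur = [] then [] else [PySem.Str.join ", " cur]
  | n :: rest =>
      let cur' := cur ++ [PySem.Int.toStr n]
      if step ≤ cur'.length then PySem.Str.join ", " cur' :: pvAux step [] rest
      else pvAux step cur' rest

theorem pvStep_eq (per_line : Int) :
    (fun (st : List String × List String) n =>
      let cur := st.2 ++ [PySem.Int.toStr n]
      if per_line ≤ (cur.length : Int) then (st.1 ++ [PySem.Str.join ", " cur], [])
      else (st.1, cur)) = pvStepN (max per_line 1).toNat := by
  funext st n
  simp only [pvStepN]
  have h : (per_line ≤ ((st.2 ++ [PySem.Int.toStr n]).length : Int)) ↔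
      ((max per_line 1).toNat ≤ (st.2 ++ [PySem.Int.toStr n]).length) := by
    simp only [List.length_append, List.length_cons, List.length_nil]
    by_cases h1 : per_line ≤ 1
    · rw [max_eq_right h1]
      constructor <;> intro _ <;> omega
    · rw [max_eq_left (by omega)]
      omega
  by_cases hc : per_line ≤ ((st.2 ++ [PySem.Int.toStr n]).length : Int)
  · rw [if_pos hc, if_pos (h.mp hc)]
  · rw [if_neg hc, if_neg (fun hh => hc (h.mpr hh))]

theorem pvFold_eq_aux (step : Nat) (ns : List Int) :
    ∀ (lines cur : List String),
      (let st := ns.foldl (pvStepN step) (lines, cur)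
       if st.2 ≠ [] then st.1 ++ [PySem.Str.join ", " st.2] else st.1)
      = lines ++ pvAux step cur ns := by
  induction ns with
  | nil =>
    intro lines cur
    simp only [List.foldl_nil, pvAux]
    by_cases h : cur = []
    · simp [h]
    · simp [h]
  | cons n rest ih =>
    intro lines cur
    simp only [List.foldl_cons, pvAux, pvStepN]
    by_cases h : step ≤ (cur ++ [PySem.Int.toStr n]).length
    · rw [if_pos h, if_pos h]
      rw [ih]
      simp [List.append_assoc]
    · rw [if_neg h, if_neg h]
      exact ih lines (cur ++ [PySem.Int.toStr n])

-- unfold one full chunk of pvAux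
theorem pvAux_advance (step : Nat) (ns : List Int) :
    ∀ (cur : List String), cur.length < step →
      pvAux step cur ns =
        if cur.length + ns.length < step then
          (if cur = [] ∧ ns = [] then []
           else [PySem.Str.join ", " (cur ++ ns.map PySem.Int.toStr)])
        else
          PySem.Str.join ", " (cur ++ ((ns.take (step - cur.length)).map PySem.Int.toStr))
            :: pvAux step [] (ns.drop (step - cur.length)) := by
  induction ns with
  | nil =>
    intro cur hlt
    have hc : cur.length + ([] : List Int).length < step := by
      simp only [List.length_nil]; omega
    rw [if_pos hc]
    by_cases h : cur = []
    · simp [pvAux, h]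
    · simp [pvAux, h]
  | cons n rest ih =>
    intro cur hlt
    have hlen : (cur ++ [PySem.Int.toStr n]).length = cur.length + 1 := by
      simp
    simp only [pvAux]
    by_cases h : step ≤ (cur ++ [PySem.Int.toStr n]).length
    · -- flush: cur.length + 1 = step
      have hl : cur.length + 1 = step := by omega
      rw [if_pos h]
      have hbig : ¬ (cur.length + (n :: rest).length < step) := by
        simp only [List.length_cons]; omega
      rw [if_neg hbig]
      have ht : step - cur.length = 1 := by omega
      simp [ht]
    · have h' : cur.length + 1 < step := by omega
      rw [if_neg h]
      have hcur' : (cur ++ [PySem.Int.toStr n]).length < step := by omega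
      rw [ih (cur ++ [PySem.Int.toStr n]) hcur']
      simp only [hlen, List.length_cons]
      by_cases hsmall : cur.length + 1 + rest.length < step
      · have hs2 : cur.length + (rest.length + 1) < step := by omega
        rw [if_pos hsmall, if_pos hs2]
        have hne : ¬ (cur ++ [PySem.Int.toStr n] = [] ∧ rest = []) := by
          intro hx
          exact absurd hx.1 (by simp)
        rw [if_neg hne]
        have hne2 : ¬ (cur = [] ∧ n :: rest = []) := by
          intro hx
          exact absurd hx.2 (by simp)
        rw [if_neg hne2]
        simp
      · have hs2 : ¬ (cur.length + (rest.length + 1) < step) := by omega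
        rw [if_neg hsmall, if_neg hs2]
        have hk : step - cur.length = (step - (cur.length + 1)) + 1 := by omega
        rw [hk]
        simp [List.take_succ_cons, List.drop_succ_cons]

theorem pvChunks_nil (step : Nat) : pvChunks step ([] : List Int) = [] := by
  rw [pvChunks]

theorem pvChunks_cons (step : Nat) (n : Int) (rest : List Int) :
    pvChunks step (n :: rest) =
      PySem.Str.join ", " (((n :: rest).take step).map PySem.Int.toStr)
        :: pvChunks step (rest.drop (step - 1)) := by
  rw [pvChunks]

-- pvAux with empty buffer is exactly B's chunking, for step >= 1
theorem pvAux_eq_chunks (step : Nat) (hstep : 1 ≤ step) :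
    ∀ ns : List Int, pvAux step [] ns = pvChunks step ns := by
  intro ns
  induction hn : ns.length using Nat.strong_induction_on generalizing ns with
  | _ k ih =>
    cases ns with
    | nil => rw [pvChunks_nil]; simp [pvAux]
    | cons n rest =>
      rw [pvAux_advance step (n :: rest) [] (by simpa using hstep), pvChunks_cons]
      simp only [List.length_nil, Nat.sub_zero, List.nil_append, Nat.zero_add,
        List.length_cons]
      by_cases hsmall : rest.length + 1 < step
      · rw [if_pos hsmall]
        rw [if_neg (show ¬(True ∧ n :: rest = []) by simp)]
        have htake : (n :: rest).take step = n :: rest := by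
          apply List.take_of_length_le
          simp only [List.length_cons]; omega
        have hdrop : rest.drop (step - 1) = [] := by
          apply List.drop_eq_nil_of_le
          omega
        rw [htake, hdrop, pvChunks_nil]
      · rw [if_neg hsmall]
        have hdrop : (n :: rest).drop step = rest.drop (step - 1) := by
          rcases Nat.exists_eq_add_of_le hstep with ⟨m, hm⟩
          subst hm
          simp [List.drop_succ_cons, Nat.add_comm]
        rw [hdrop]
        subst hn
        have hrec : (rest.drop (step - 1)).length < (n :: rest).length := by
          have := List.length_drop (l := rest) (i := step - 1)
          simp only [List.length_cons]
          omega
        rw [ih (rest.drop (step - 1)).length hrec _ rfl]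

-- ===== VERDICT (by name: the statement is the Claim_ definition above) =====
theorem format_nset_spec : Claim_equal_format_nset := by
  intro name nodes per_line _
  unfold Spec_format_nset format_nset format_nset_alt
  have hstep : 1 ≤ (max per_line 1).toNat := by
    have : (1 : Int) ≤ max per_line 1 := le_max_right _ _
    omega
  rw [pvStep_eq per_line]
  have h := pvFold_eq_aux (max per_line 1).toNat nodes ["*NSET, NSET=" ++ name] []
  simp only [] at h ⊢
  rw [h, pvAux_eq_chunks _ hstep]
  simp
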